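-- pv_equiv track=rewrite | github.com/Godzillas/alarm-analysis-system | src/adapters/base.py | extract_system_info
-- ===== SOURCE A (Python) =====
-- from typing import Dict, List, Any, Optional
--
-- def extract_system_info(raw_data: Dict[str, Any]) -> Dict[str, str]:
--     """
--     从原始数据中提取系统信息
--
--     Args:
--         raw_data: 原始数据
--
--     Returns:
--         Dict[str, str]: 系统信息字典
--     """
--     system_info = {}
--
--     # 尝试从不同字段提取系统信息
--     labels = raw_data.get("labels", {})
--     tags = raw_data.get("tags", {})
--
--     # 提取服务名
--     service_fields = ["service", "service_name", "app", "application", "job"]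
--     for field in service_fields:
--         if field in labels:
--             system_info["service"] = labels[field]
--             break
--         elif field in tags:
--             system_info["service"] = tags[field]
--             break
--
--     # 提取环境
--     env_fields = ["environment", "env", "stage", "tier"]
--     for field in env_fields:
--         if field in labels:
--             system_info["environment"] = labels[field]
--             break
--         elif field in tags:
--             system_info["environment"] = tags[field]
--             break
--
--     # 提取实例
--     instance_fields = ["instance", "host", "hostname", "node"]
--     for field in instance_fields:
--         if field in labels:
--             system_info["instance"] = labels[field]
--             break
--         elif field in tags:
--             system_info["instance"] = tags[field]
--             break
--
--     # 提取团队
--     team_fields = ["team", "owner", "responsible_team"]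
--     for field in team_fields:
--         if field in labels:
--             system_info["team"] = labels[field]
--             break
--         elif field in tags:
--             system_info["team"] = tags[field]
--             break
--
--     return system_info
-- ===== SOURCE B (Python) =====
-- def extract_system_info(raw_data):
--     combined = {**raw_data.get("tags", {}), **raw_data.get("labels", {})}
--     specs = [
--         ("service", ["service", "service_name", "app", "application", "job"]),
--         ("environment", ["environment", "env", "stage", "tier"]),
--         ("instance", ["instance", "host", "hostname", "node"]),
--         ("team", ["team", "owner", "responsible_team"]),
--     ]
--     system_info = {}
--     for key, fields in specs:
--         for field in reversed(fields):
--             if field in combined: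
--                 system_info[key] = combined[field]
--     return system_info
-- ===== Notes on version B (the rewrite author's own statement) =====
-- stated objective: alternative
-- what changed: Replaces A's four copy-pasted first-match scans with break/elif over two dicts by one merged lookup dict {**tags, **labels} and, per result key, a reversed overwrite pass over the field list (last write wins, no early exit).
import Mathlib
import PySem

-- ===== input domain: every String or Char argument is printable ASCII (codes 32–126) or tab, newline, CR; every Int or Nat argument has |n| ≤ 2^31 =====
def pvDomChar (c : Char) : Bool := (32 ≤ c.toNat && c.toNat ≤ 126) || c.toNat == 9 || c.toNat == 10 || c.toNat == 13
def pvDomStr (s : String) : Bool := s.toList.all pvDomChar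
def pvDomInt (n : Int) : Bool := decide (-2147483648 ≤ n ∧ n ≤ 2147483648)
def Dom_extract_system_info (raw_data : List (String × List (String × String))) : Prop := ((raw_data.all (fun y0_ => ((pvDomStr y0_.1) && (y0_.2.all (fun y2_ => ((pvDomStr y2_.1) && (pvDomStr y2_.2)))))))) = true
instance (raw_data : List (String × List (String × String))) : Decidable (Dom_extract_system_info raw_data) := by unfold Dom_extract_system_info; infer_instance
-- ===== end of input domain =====

-- B replaces A's four copy-pasted first-match scans with break/elif over two dicts by one
-- merged lookup dict {**tags, **labels} and, per result key, a reversed overwrite pass over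
-- the field list (last write wins, no early exit).

-- ===== PORT A =====
-- 'for field in fields: if field in labels: …; break / elif field in tags: …; break'
def pvPickA (labels tags : PySem.Dict String String) (d : PySem.Dict String String)
    (key : String) : List String → PySem.Dict String String
  | [] => d
  | f :: rest =>
    match labels.get? f with
    | some v => d.insert key v
    | none =>
      match tags.get? f with
      | some v => d.insert key v
      | none => pvPickA labels tags d key rest

def extract_system_info (raw_data : List (String × List (String × String))) : List (String × String) :=
  let rd := PySem.Dict.ofList raw_data
  let labels := PySem.Dict.ofList (rd.getD "labels" [])
  let tags := PySem.Dict.ofList (rd.getD "tags" [])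
  let d0 : PySem.Dict String String := PySem.Dict.empty
  let d1 := pvPickA labels tags d0 "service" ["service", "service_name", "app", "application", "job"]
  let d2 := pvPickA labels tags d1 "environment" ["environment", "env", "stage", "tier"]
  let d3 := pvPickA labels tags d2 "instance" ["instance", "host", "hostname", "node"]
  let d4 := pvPickA labels tags d3 "team" ["team", "owner", "responsible_team"]
  d4.items

-- ===== PORT B =====
def pvSpecs : List (String × List String) :=
  [("service", ["service", "service_name", "app", "application", "job"]),
   ("environment", ["environment", "env", "stage", "tier"]),
   ("instance", ["instance", "host", "hostname", "node"]),
   ("team", ["team", "owner", "responsible_team"])]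

-- 'for field in reversed(fields): if field in combined: system_info[key] = combined[field]'
def pvPickB (combined : PySem.Dict String String) (d : PySem.Dict String String)
    (key : String) (fields : List String) : PySem.Dict String String :=
  fields.reverse.foldl
    (fun d f =>
      match combined.get? f with
      | some v => d.insert key v
      | none => d) d

def extract_system_info_alt (raw_data : List (String × List (String × String))) : List (String × String) :=
  let rd := PySem.Dict.ofList raw_data
  -- combined = {**tags, **labels}
  let tags := PySem.Dict.ofList (rd.getD "tags" [])
  let combined := (PySem.Dict.ofList (rd.getD "labels" []) : PySem.Dict String String).items.foldl
    (fun d p => d.insert p.1 p.2) tags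
  (pvSpecs.foldl (fun d kf => pvPickB combined d kf.1 kf.2) PySem.Dict.empty).items

-- ===== PRECONDITION & SPEC =====
def Spec_extract_system_info (raw_data : List (String × List (String × String))) (out : List (String × String)) : Prop := out = extract_system_info_alt raw_data
instance (raw_data : List (String × List (String × String))) (out : List (String × String)) : Decidable (Spec_extract_system_info raw_data out) := by unfold Spec_extract_system_info; infer_instance

-- ===== CLAIM (what is proved, stated in full; the proofs are below) =====
def Claim_equal_extract_system_info : Prop := ∀ (raw_data : List (String × List (String × String))), Dom_extract_system_info raw_data → Spec_extract_system_info raw_data (extract_system_info raw_data)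

-- ===== LEMMAS AND PROOFS =====

-- lookup in the merge {**tags, **labels}: labels first, then tags
theorem get?_foldl_insert (l : List (String × String)) (d : PySem.Dict String String)
    (hl : (l.map Prod.fst).Nodup) (f : String) :
    (l.foldl (fun d p => d.insert p.1 p.2) d).get? f
      = ((PySem.Dict.mk l).get? f).or (d.get? f) := by
  induction l generalizing d with
  | nil => simp [PySem.Dict.get?]
  | cons p rest ih =>
    obtain ⟨k, v⟩ := p
    simp only [List.map_cons, List.nodup_cons] at hl
    rw [List.foldl_cons, ih _ hl.2, PySem.Dict.get?_mk_cons]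
    by_cases hkf : k = f
    · subst hkf
      have hnone : (PySem.Dict.mk rest).get? k = none := by
        rw [PySem.Dict.get?_eq_none_iff_not_mem_keys]
        simpa [PySem.Dict.keys_mk] using hl.1
      simp [hnone, PySem.Dict.get?_insert_self]
    · have hfk : f ≠ k := fun h => hkf h.symm
      simp only [PySem.Dict.get?_insert_of_ne _ _ hfk, beq_iff_eq, if_neg hkf]

-- pvPickA only ever writes at `key`, so a later overwrite at `key` erases its effect
theorem insert_pvPickA (labels tags : PySem.Dict String String)
    (d : PySem.Dict String String) (key : String) (fields : List String) (v : String) :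
    (pvPickA labels tags d key fields).insert key v = d.insert key v := by
  induction fields generalizing d with
  | nil => rfl
  | cons f rest ih =>
    simp only [pvPickA]
    cases labels.get? f with
    | some w => rw [PySem.Dict.insert_insert_self]
    | none => cases tags.get? f with
      | some w => rw [PySem.Dict.insert_insert_self]
      | none => exact ih d

-- the reversed overwrite pass over `combined` equals A's first-match scan over labels/tags
theorem pick_eq (labels tags : PySem.Dict String String)
    (combined : PySem.Dict String String)
    (hc : ∀ f, combined.get? f = ((labels.get? f).or (tags.get? f)))
    (d : PySem.Dict String String) (key : String) (fields : List String) :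
    pvPickB combined d key fields = pvPickA labels tags d key fields := by
  induction fields generalizing d with
  | nil => rfl
  | cons f rest ih =>
    simp only [pvPickB, List.reverse_cons, List.foldl_append, List.foldl_cons, List.foldl_nil]
    simp only [pvPickB] at ih
    rw [ih d]
    simp only [pvPickA, hc f]
    cases hl : labels.get? f with
    | some v => simp only [Option.some_or, insert_pvPickA]
    | none =>
      cases ht : tags.get? f with
      | some v => simp only [Option.none_or, insert_pvPickA]
      | none => rfl

-- ===== VERDICT (by name: the statement is the Claim_ definition above) =====
theorem extract_system_info_spec : Claim_equal_extract_system_info := by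
  intro raw_data _
  unfold Spec_extract_system_info extract_system_info extract_system_info_alt
  simp only []
  set rd := PySem.Dict.ofList raw_data with hrd
  set labels := PySem.Dict.ofList (rd.getD "labels" []) with hlab
  set tags := PySem.Dict.ofList (rd.getD "tags" []) with htag
  have hnd : (labels.items.map Prod.fst).Nodup := PySem.Dict.nodup_keys_ofList _
  have hmk : PySem.Dict.mk labels.items = labels := rfl
  have hc : ∀ f, (labels.items.foldl (fun d p => d.insert p.1 p.2) tags).get? f
      = ((labels.get? f).or (tags.get? f)) := by
    intro f
    rw [get?_foldl_insert _ _ hnd f, hmk]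
  simp only [pvSpecs, List.foldl_cons, List.foldl_nil]
  rw [pick_eq _ tags _ hc, pick_eq _ tags _ hc, pick_eq _ tags _ hc, pick_eq _ tags _ hc]
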